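-- pv_equiv track=rewrite | github.com/MaximeMoutet13/Stage_2020 | tbs/gamma_free/concepts.py | column_concept_from_dlo_gamma_free_matrix
-- ===== SOURCE A (Python) =====
-- def column_concept_from_dlo_gamma_free_matrix(matrix):
--     column_concepts = set()
--     for j in range(len(matrix[0])):
--         new_if_true = False
--         for i in range(len(matrix) - 1, -1, -1):
--             if matrix[i][j]:
--                 if j == 0 or not matrix[i][j - 1]:
--                     new_if_true = True
--
--                 if new_if_true:
--                     column_concepts.add((i, j))
--
--     return column_concepts
-- ===== SOURCE B (Python) =====
-- def column_concept_from_dlo_gamma_free_matrix(matrix):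
--     width = len(matrix[0])
--     cols = [[row[j] for row in matrix] for j in range(width)]
--     concepts = []
--     for j, col in enumerate(cols):
--         starters = [i for i, v in enumerate(col) if v and (j == 0 or not cols[j - 1][i])]
--         if starters:
--             b = starters[-1]
--             concepts.extend((i, j) for i in range(b, -1, -1) if col[i])
--     return set(concepts)
-- ===== Notes on version B (the rewrite author's own statement) =====
-- stated objective: alternative
-- what changed: B transposes the matrix into explicit column lists, builds each column's concept-starting rows ascending with enumerate and takes the last as the bottom-most boundary (no latch flag, no bottom-up scan), accumulates a plain list of coordinates and converts it to a set once at the end.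
-- outside the precondition, e.g. on column_concept_from_dlo_gamma_free_matrix([]): A raises IndexError, B raises IndexError; on column_concept_from_dlo_gamma_free_matrix([[1, 0], [1]]): A raises IndexError, B raises IndexError
import Mathlib
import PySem

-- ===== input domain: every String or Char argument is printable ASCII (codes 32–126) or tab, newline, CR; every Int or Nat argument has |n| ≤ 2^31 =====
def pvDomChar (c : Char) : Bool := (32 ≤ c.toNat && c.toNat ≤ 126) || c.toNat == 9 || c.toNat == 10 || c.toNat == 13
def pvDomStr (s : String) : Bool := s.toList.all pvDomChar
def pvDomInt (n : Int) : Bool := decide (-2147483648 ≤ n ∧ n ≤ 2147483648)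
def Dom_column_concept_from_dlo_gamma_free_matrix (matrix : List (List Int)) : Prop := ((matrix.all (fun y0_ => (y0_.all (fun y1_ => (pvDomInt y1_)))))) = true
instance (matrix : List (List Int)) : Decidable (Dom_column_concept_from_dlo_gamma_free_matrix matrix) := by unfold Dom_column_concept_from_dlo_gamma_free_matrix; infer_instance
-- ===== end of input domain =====

-- B transposes the matrix into explicit columns, lists each column's concept-starting rows in
-- ascending order and takes the last (bottom-most), then collects a plain list and builds the
-- set once at the end — an alternative decomposition, same cost, return value only.

-- matrix[i][j], total form; exact under Pre_ (indices always in range there)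
def pvCell (matrix : List (List Int)) (i j : Int) : Int :=
  PySem.List.pyGetD (PySem.List.pyGetD matrix i []) j 0

-- ===== PORT A =====
-- body of A's inner loop (state: the set so far, new_if_true)
def pvStepA (matrix : List (List Int)) (j : Int)
    (st : PySem.Set (Int × Int) × Bool) (i : Int) : PySem.Set (Int × Int) × Bool :=
  if pvCell matrix i j ≠ 0 then
    let new_if_true := if j = 0 ∨ pvCell matrix i (j - 1) = 0 then true else st.2
    ((if new_if_true then PySem.Set.add st.1 (i, j) else st.1), new_if_true)
  else st

def column_concept_from_dlo_gamma_free_matrix (matrix : List (List Int)) : List (Int × Int) :=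
  (PySem.List.pyRange 0 matrix.headI.length 1).foldl
    (fun column_concepts j =>
      ((PySem.List.pyRange ((matrix.length : Int) - 1) (-1) (-1)).foldl
        (pvStepA matrix j) (column_concepts, false)).1)
    PySem.Set.empty

-- ===== PORT B =====
-- Source B's transposed columns: cols = [[row[j] for row in matrix] for j in range(width)]
def pvCols (matrix : List (List Int)) : List (List Int) :=
  (PySem.List.pyRange 0 (matrix.headI.length) 1).map
    (fun j => matrix.map (fun row => PySem.List.pyGetD row j 0))

-- Source B's starters: ascending rows i with col[i] truthy and (j == 0 or not cols[j-1][i])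
def pvStarters (matrix : List (List Int)) (j : Int) (col : List Int) : List Int :=
  ((PySem.List.enumerate col).filter
    (fun iv : Int × Int => decide (iv.2 ≠ 0 ∧
      (j = 0 ∨ PySem.List.pyGetD (PySem.List.pyGetD (pvCols matrix) (j - 1) []) iv.1 0 = 0)))).map (·.1)

-- Source B's loop body: if starters, extend concepts with (i, j) for i in range(starters[-1], -1, -1) if col[i]
def pvBodyB (matrix : List (List Int)) (concepts : List (Int × Int)) (jc : Int × List Int) :
    List (Int × Int) :=
  match (pvStarters matrix jc.1 jc.2).getLast? with
  | none => concepts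
  | some b => concepts ++ ((PySem.List.pyRange b (-1) (-1)).filterMap
      (fun i => if PySem.List.pyGetD jc.2 i 0 ≠ 0 then some (i, jc.1) else none))

def column_concept_from_dlo_gamma_free_matrix_alt (matrix : List (List Int)) : List (Int × Int) :=
  PySem.Set.ofList ((PySem.List.enumerate (pvCols matrix)).foldl (pvBodyB matrix) [])

-- ===== PRECONDITION & SPEC =====
-- Pre_ excludes exactly the inputs where Python A raises IndexError: the empty matrix
-- (matrix[0]) and ragged matrices with a row shorter than the first row.
def Pre_column_concept_from_dlo_gamma_free_matrix (matrix : List (List Int)) : Prop :=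
  matrix ≠ [] ∧ ∀ row ∈ matrix, matrix.headI.length ≤ row.length
instance (matrix : List (List Int)) : Decidable (Pre_column_concept_from_dlo_gamma_free_matrix matrix) := by unfold Pre_column_concept_from_dlo_gamma_free_matrix; infer_instance

def pvWitness_column_concept_from_dlo_gamma_free_matrix : List (List Int) := [[1, 0], [0, 1]]

def Spec_column_concept_from_dlo_gamma_free_matrix (matrix : List (List Int)) (out : List (Int × Int)) : Prop := out = column_concept_from_dlo_gamma_free_matrix_alt matrix
instance (matrix : List (List Int)) (out : List (Int × Int)) : Decidable (Spec_column_concept_from_dlo_gamma_free_matrix matrix out) := by unfold Spec_column_concept_from_dlo_gamma_free_matrix; infer_instance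

-- ===== CLAIM (what is proved, stated in full; the proofs are below) =====
def Claim_equal_column_concept_from_dlo_gamma_free_matrix : Prop := ∀ (matrix : List (List Int)), Dom_column_concept_from_dlo_gamma_free_matrix matrix → Pre_column_concept_from_dlo_gamma_free_matrix matrix → Spec_column_concept_from_dlo_gamma_free_matrix matrix (column_concept_from_dlo_gamma_free_matrix matrix)

-- ===== LEMMAS AND PROOFS =====

-- A's boundary test, as a Bool on the raw matrix
def pvBoundary (matrix : List (List Int)) (i j : Int) : Bool :=
  decide (pvCell matrix i j ≠ 0 ∧ (j = 0 ∨ pvCell matrix i (j - 1) = 0))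

-- the per-column contribution (descending rows from the bottom-most boundary)
def pvContrib (matrix : List (List Int)) (j : Int) : List (Int × Int) :=
  match (PySem.List.pyRange ((matrix.length : Int) - 1) (-1) (-1)).find?
          (fun i => pvBoundary matrix i j) with
  | none => []
  | some b => (PySem.List.pyRange b (-1) (-1)).filterMap
      (fun i => if pvCell matrix i j ≠ 0 then some (i, j) else none)

-- A's "collect once latched" step
def pvStepB (matrix : List (List Int)) (j : Int)
    (concepts : PySem.Set (Int × Int)) (i : Int) : PySem.Set (Int × Int) :=
  if pvCell matrix i j ≠ 0 then PySem.Set.add concepts (i, j) else concepts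

theorem pvLatchTrue (matrix : List (List Int)) (j : Int) (l : List Int) (cc : PySem.Set (Int × Int)) :
    l.foldl (pvStepA matrix j) (cc, true) = (l.foldl (pvStepB matrix j) cc, true) := by
  induction l generalizing cc with
  | nil => rfl
  | cons i t ih =>
      have h : pvStepA matrix j (cc, true) i = (pvStepB matrix j cc i, true) := by
        by_cases hc : pvCell matrix i j ≠ 0
        · simp [pvStepA, pvStepB, hc, ite_self]
        · simp [pvStepA, pvStepB, hc]
      rw [List.foldl_cons, List.foldl_cons, h]
      exact ih _

-- Per column: A's latch scan over a countdown range equals "find boundary, then collect".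
theorem pvColumn (matrix : List (List Int)) (j : Int) (n : Nat) (cc : PySem.Set (Int × Int)) :
    ((PySem.List.pyRange ((n : Int) - 1) (-1) (-1)).foldl (pvStepA matrix j) (cc, false)).1
    = (match (PySem.List.pyRange ((n : Int) - 1) (-1) (-1)).find?
              (fun i => pvBoundary matrix i j) with
      | none => cc
      | some b => (PySem.List.pyRange b (-1) (-1)).foldl (pvStepB matrix j) cc) := by
  induction n generalizing cc with
  | zero =>
      rw [PySem.List.pyRange_neg_one_eq_nil (by norm_num)]
      rfl
  | succ n ih =>
      have hcons : PySem.List.pyRange (((n + 1 : Nat) : Int) - 1) (-1) (-1)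
          = (n : Int) :: PySem.List.pyRange ((n : Int) - 1) (-1) (-1) := by
        have h := PySem.List.pyRange_neg_one_cons (a := ((n + 1 : Nat) : Int) - 1) (b := -1)
          (by push_cast; omega)
        rw [h]; congr 1 <;> push_cast <;> ring_nf
      rw [hcons, List.foldl_cons, List.find?_cons]
      by_cases hb : pvBoundary matrix (n : Int) j = true
      · have hc : pvCell matrix (n : Int) j ≠ 0 := (of_decide_eq_true hb).1
        have hcond : j = 0 ∨ pvCell matrix (n : Int) (j - 1) = 0 := (of_decide_eq_true hb).2
        have hA : pvStepA matrix j (cc, false) (n : Int) = (PySem.Set.add cc ((n : Int), j), true) := by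
          simp [pvStepA, hc, hcond]
        rw [hA, pvLatchTrue, hb]
        have hcons2 : PySem.List.pyRange (n : Int) (-1) (-1)
            = (n : Int) :: PySem.List.pyRange ((n : Int) - 1) (-1) (-1) :=
          PySem.List.pyRange_neg_one_cons (by omega)
        simp only [hcons2, List.foldl_cons]
        have hB : pvStepB matrix j cc (n : Int) = PySem.Set.add cc ((n : Int), j) := by
          simp [pvStepB, hc]
        rw [hB]
      · have hA : pvStepA matrix j (cc, false) (n : Int) = (cc, false) := by
          by_cases hc : pvCell matrix (n : Int) j ≠ 0
          · have hcond : ¬ (j = 0 ∨ pvCell matrix (n : Int) (j - 1) = 0) := by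
              intro h
              exact hb (decide_eq_true ⟨hc, h⟩)
            simp [pvStepA, hc, hcond]
          · simp [pvStepA, hc]
        rw [hA]
        simp only [Bool.not_eq_true] at hb
        simp only [hb]
        exact ih cc

-- folding pvStepB over a nodup list of fresh rows is just appending the filtered pairs
theorem pvStepB_append (matrix : List (List Int)) (j : Int) :
    ∀ (l : List Int) (cc : PySem.Set (Int × Int)), l.Nodup → (∀ i ∈ l, (i, j) ∉ cc) →
    l.foldl (pvStepB matrix j) cc
      = cc ++ l.filterMap (fun i => if pvCell matrix i j ≠ 0 then some (i, j) else none) := by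
  intro l
  induction l with
  | nil => intro cc _ _; simp
  | cons i t ih =>
      intro cc hnd hfresh
      by_cases hc : pvCell matrix i j ≠ 0
      · have hstep : pvStepB matrix j cc i = cc ++ [(i, j)] := by
          rw [pvStepB, if_pos hc, PySem.Set.add_of_not_mem (hfresh i (by simp))]
        rw [List.foldl_cons, hstep,
          ih (cc ++ [(i, j)]) hnd.of_cons
            (by
              intro i' hi'
              have h1 : (i', j) ∉ cc := hfresh i' (by simp [hi'])
              have h2 : (i', j) ≠ (i, j) := by
                intro h
                have h3 : i' = i := by simpa using congrArg Prod.fst h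
                exact (List.nodup_cons.mp hnd).1 (h3 ▸ hi')
              simp [h1, h2]),
          List.filterMap_cons, if_pos hc]
        simp
      · rw [List.foldl_cons, pvStepB, if_neg hc,
          ih cc hnd.of_cons (fun i' hi' => hfresh i' (by simp [hi'])),
          List.filterMap_cons, if_neg hc]

-- every pair of pvContrib has second component j
theorem pvContrib_snd (matrix : List (List Int)) (j : Int) :
    ∀ p ∈ pvContrib matrix j, p.2 = j := by
  intro p hp
  unfold pvContrib at hp
  rcases hfind : (PySem.List.pyRange ((matrix.length : Int) - 1) (-1) (-1)).find?
      (fun i => pvBoundary matrix i j) with _ | b <;> rw [hfind] at hp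
  · simp at hp
  · rcases List.mem_filterMap.mp hp with ⟨i, _, hi⟩
    by_cases hc : pvCell matrix i j ≠ 0 <;> simp [hc] at hi
    exact (hi.symm ▸ rfl : p.2 = j)

-- the countdown range is nodup
theorem pvRange_countdown_nodup (a : Int) : (PySem.List.pyRange a (-1) (-1)).Nodup := by
  rw [PySem.List.pyRange_neg_one_eq_reverse]
  exact List.nodup_reverse.mpr (PySem.List.nodup_pyRange_one _ _)

-- A over a nodup list of column indices, with all pairs in cc from other columns
theorem pvAfold (matrix : List (List Int)) :
    ∀ (ljs : List Int) (cc : PySem.Set (Int × Int)), ljs.Nodup →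
    (∀ p ∈ cc, p.2 ∉ ljs) →
    ljs.foldl
      (fun column_concepts j =>
        ((PySem.List.pyRange ((matrix.length : Int) - 1) (-1) (-1)).foldl
          (pvStepA matrix j) (column_concepts, false)).1) cc
      = cc ++ ljs.flatMap (pvContrib matrix) := by
  intro ljs
  induction ljs with
  | nil => intro cc _ _; simp
  | cons j t ih =>
      intro cc hnd hcc
      rw [List.foldl_cons, pvColumn matrix j matrix.length cc]
      have hcol : (match (PySem.List.pyRange ((matrix.length : Int) - 1) (-1) (-1)).find?
              (fun i => pvBoundary matrix i j) with
          | none => cc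
          | some b => (PySem.List.pyRange b (-1) (-1)).foldl (pvStepB matrix j) cc)
          = cc ++ pvContrib matrix j := by
        unfold pvContrib
        rcases hfind : (PySem.List.pyRange ((matrix.length : Int) - 1) (-1) (-1)).find?
            (fun i => pvBoundary matrix i j) with _ | b
        · simp
        · exact pvStepB_append matrix j _ cc (pvRange_countdown_nodup b)
            (fun i _ hmem => (hcc (i, j) hmem) (by simp))
      rw [hcol, ih (cc ++ pvContrib matrix j) hnd.of_cons
        (by
          intro p hp hpt
          rcases List.mem_append.mp hp with h | h
          · exact hcc p h (List.mem_cons_of_mem _ hpt)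
          · exact (List.nodup_cons.mp hnd).1 (pvContrib_snd matrix j p h ▸ hpt))]
      simp

-- each column's contribution is duplicate-free
theorem pvContrib_nodup (matrix : List (List Int)) (j : Int) : (pvContrib matrix j).Nodup := by
  unfold pvContrib
  rcases (PySem.List.pyRange ((matrix.length : Int) - 1) (-1) (-1)).find?
      (fun i => pvBoundary matrix i j) with _ | b
  · exact List.nodup_nil
  · refine List.Nodup.filterMap ?_ (pvRange_countdown_nodup b)
    intro a a' p hp hp'
    by_cases h1 : pvCell matrix a j ≠ 0 <;> simp [h1] at hp
    by_cases h2 : pvCell matrix a' j ≠ 0 <;> simp [h2] at hp'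
    exact congrArg Prod.fst (hp.trans hp'.symm)

-- the concatenation over distinct columns is duplicate-free
theorem pvFlat_nodup (matrix : List (List Int)) :
    ∀ (ljs : List Int), ljs.Nodup → (ljs.flatMap (pvContrib matrix)).Nodup := by
  intro ljs
  induction ljs with
  | nil => intro _; exact List.nodup_nil
  | cons j t ih =>
      intro hnd
      rw [List.flatMap_cons]
      refine (pvContrib_nodup matrix j).append (ih hnd.of_cons) ?_
      intro p hp hpt
      rcases List.mem_flatMap.mp hpt with ⟨j', hj', hp'⟩
      exact (List.nodup_cons.mp hnd).1
        (by rw [← pvContrib_snd matrix j p hp, pvContrib_snd matrix j' p hp']; exact hj')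

-- A's result is the concatenation of the per-column contributions
theorem pvAeq (matrix : List (List Int)) :
    column_concept_from_dlo_gamma_free_matrix matrix
      = (PySem.List.pyRange 0 (matrix.headI.length) 1).flatMap (pvContrib matrix) := by
  unfold column_concept_from_dlo_gamma_free_matrix
  rw [pvAfold matrix _ PySem.Set.empty (PySem.List.nodup_pyRange_one _ _) (by intro p hp; simp [PySem.Set.empty] at hp)]
  rfl

-- the j-th transposed column
def pvColOf (matrix : List (List Int)) (j : Int) : List Int :=
  matrix.map (fun row => PySem.List.pyGetD row j 0)

theorem pvColCell (matrix : List (List Int)) (j i : Int) :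
    PySem.List.pyGetD (pvColOf matrix j) i 0 = pvCell matrix i j := by
  have h := PySem.List.pyGetD_map (fun row => PySem.List.pyGetD row j 0) matrix i []
  simpa [pvColOf, pvCell, PySem.List.pyGetD, PySem.List.pyGet?] using h

-- B's result is the set of that same concatenation
-- the transposed column list: length and entries
theorem pvCols_len (matrix : List (List Int)) :
    PySem.List.len (pvCols matrix) = (matrix.headI.length : Int) := by
  simp [pvCols, PySem.List.length_pyRange_one]

theorem pvCols_get (matrix : List (List Int)) (j : Int) (h0 : 0 ≤ j)
    (h1 : j < (matrix.headI.length : Int)) :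
    PySem.List.pyGetD (pvCols matrix) j [] = pvColOf matrix j := by
  unfold pvCols pvColOf
  exact PySem.List.pyGetD_map_pyRange_of_nonneg _ _ _ _ h0 h1

-- Source B's starters list is the ascending row indices satisfying A's boundary test
theorem pvStartersEq (matrix : List (List Int)) (j : Int) (h0 : 0 ≤ j)
    (h1 : j < (matrix.headI.length : Int)) :
    pvStarters matrix j (pvColOf matrix j)
      = (PySem.List.pyRange 0 ((matrix.length : Int)) 1).filter
          (fun i => pvBoundary matrix i j) := by
  unfold pvStarters
  rw [PySem.List.enumerate_eq_map_pyRange (pvColOf matrix j) 0]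
  have hlen : PySem.List.len (pvColOf matrix j) = (matrix.length : Int) := by
    simp [pvColOf]
  rw [hlen, List.filter_map, List.map_map]
  have hid : ((·.1) ∘ fun i => (i, PySem.List.pyGetD (pvColOf matrix j) i 0))
      = fun i : Int => i := rfl
  rw [hid, List.map_id']
  refine List.filter_congr ?_
  intro i _
  show decide (PySem.List.pyGetD (pvColOf matrix j) i 0 ≠ 0 ∧
      (j = 0 ∨ PySem.List.pyGetD (PySem.List.pyGetD (pvCols matrix) (j - 1) []) i 0 = 0))
    = pvBoundary matrix i j
  unfold pvBoundary
  rw [decide_eq_decide]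
  by_cases hj : j = 0
  · simp [hj, pvColCell]
  · have hprev : PySem.List.pyGetD (pvCols matrix) (j - 1) [] = pvColOf matrix (j - 1) :=
      pvCols_get matrix (j - 1) (by omega) (by omega)
    rw [hprev, pvColCell, pvColCell]

-- Source B's loop body appends exactly the per-column contribution
theorem pvBodyBEq (matrix : List (List Int)) (j : Int) (h0 : 0 ≤ j)
    (h1 : j < (matrix.headI.length : Int)) (acc : List (Int × Int)) :
    pvBodyB matrix acc (j, pvColOf matrix j) = acc ++ pvContrib matrix j := by
  unfold pvBodyB pvContrib
  have hrev : PySem.List.pyRange ((matrix.length : Int) - 1) (-1) (-1)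
      = (PySem.List.pyRange 0 ((matrix.length : Int)) 1).reverse := by
    rw [PySem.List.pyRange_neg_one_eq_reverse]
    norm_num
  rw [pvStartersEq matrix j h0 h1, List.getLast?_filter, ← hrev]
  rcases (PySem.List.pyRange ((matrix.length : Int) - 1) (-1) (-1)).find?
      (fun i => pvBoundary matrix i j) with _ | b
  · simp
  · simp only [pvColCell]

theorem pvBalt (matrix : List (List Int)) :
    column_concept_from_dlo_gamma_free_matrix_alt matrix
      = PySem.Set.ofList
          ((PySem.List.pyRange 0 (matrix.headI.length) 1).flatMap (pvContrib matrix)) := by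
  unfold column_concept_from_dlo_gamma_free_matrix_alt
  congr 1
  rw [PySem.List.enumerate_eq_map_pyRange (pvCols matrix) [], pvCols_len, List.foldl_map]
  trans ((PySem.List.pyRange 0 (matrix.headI.length) 1).foldl
    (fun acc j => acc ++ pvContrib matrix j) [])
  · apply PySem.List.foldl_congr_mem
    intro acc j hj
    rcases PySem.List.mem_pyRange_one.mp hj with ⟨hj0, hj1⟩
    rw [pvCols_get matrix j hj0 hj1]
    exact pvBodyBEq matrix j hj0 hj1 acc
  · rw [PySem.List.foldl_append_eq_flatMap]
    simp

-- ===== VERDICT (by name: the statement is the Claim_ definition above) =====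
theorem column_concept_from_dlo_gamma_free_matrix_spec : Claim_equal_column_concept_from_dlo_gamma_free_matrix := by
  intro matrix _ _
  unfold Spec_column_concept_from_dlo_gamma_free_matrix
  rw [pvAeq, pvBalt,
    PySem.Set.ofList_eq_self_of_nodup _ (pvFlat_nodup matrix _ (PySem.List.nodup_pyRange_one _ _))]
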